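-- pv_equiv track=rewrite | github.com/workjingmai-lab/nova-os | tools/next-task-suggester.py | prioritize_actions
-- ===== SOURCE A (Python) =====
-- def prioritize_actions(actions: list) -> list:
--     """Prioritize by impact"""
--     # High-priority keywords
--     high_priority = ["send", "execute", "revenue", "pipeline", "approval"]
--     medium_priority = ["document", "create", "build"]
--
--     prioritized = []
--     for action in actions:
--         priority = "medium"
--         action_lower = action.lower()
--         if any(kw in action_lower for kw in high_priority):
--             priority = "high"
--         elif any(kw in action_lower for kw in medium_priority):
--             priority = "medium"
--         prioritized.append((priority, action))
--
--     # Sort by priority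
--     prioritized.sort(key=lambda x: {"high": 0, "medium": 1, "low": 2}.get(x[0], 3))
--     return prioritized
-- ===== SOURCE B (Python) =====
-- def prioritize_actions(actions: list) -> list:
--     """Prioritize by impact: one pass partitioning into high/medium buckets,
--     then concatenate (replaces the explicit sort; stable order preserved)."""
--     high_priority = ["send", "execute", "revenue", "pipeline", "approval"]
--     high = []
--     medium = []
--     for action in actions:
--         action_lower = action.lower()
--         if any(kw in action_lower for kw in high_priority):
--             high.append(("high", action))
--         else:
--             medium.append(("medium", action))
--     return high + medium
-- ===== Notes on version B (the rewrite author's own statement) =====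
-- stated objective: simpler
-- what changed: Replaces classify-then-sort with a single pass that partitions actions into a high and a medium bucket and concatenates them, dropping the sort and the redundant medium-keyword check (priority already defaults to medium).
import Mathlib
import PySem

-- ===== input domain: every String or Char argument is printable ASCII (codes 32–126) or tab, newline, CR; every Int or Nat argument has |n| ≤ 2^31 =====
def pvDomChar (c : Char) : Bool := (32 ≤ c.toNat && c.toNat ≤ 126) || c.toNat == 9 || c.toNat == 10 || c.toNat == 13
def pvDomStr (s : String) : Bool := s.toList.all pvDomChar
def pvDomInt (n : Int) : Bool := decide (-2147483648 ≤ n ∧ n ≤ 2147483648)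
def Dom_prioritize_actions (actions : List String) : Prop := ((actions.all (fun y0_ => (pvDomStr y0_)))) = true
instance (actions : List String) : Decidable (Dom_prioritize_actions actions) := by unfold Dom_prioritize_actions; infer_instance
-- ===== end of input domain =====

-- B replaces A's classify-then-sort with a one-pass partition into a high and a medium
-- bucket followed by concatenation (simpler; the explicit sort disappears).

-- ===== PORT A =====
-- the keyword lists (helpers shared by both ports, exactly the Python literals)
def pvHighKws : List String := ["send", "execute", "revenue", "pipeline", "approval"]
def pvMediumKws : List String := ["document", "create", "build"]
-- the sort key of A: {"high": 0, "medium": 1, "low": 2}.get(x[0], 3)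
def pvKeyA (x : String × String) : Int :=
  PySem.Dict.getD ((((PySem.Dict.empty).insert "high" (0 : Int)).insert "medium" 1).insert "low" 2) x.1 3

def prioritize_actions (actions : List String) : List (String × String) :=
  let prioritized : List (String × String) :=
    actions.foldl (fun acc action =>
      let priority := "medium"
      let action_lower := PySem.Str.lower action
      let priority :=
        if pvHighKws.any (fun kw => PySem.Str.isIn kw action_lower) then "high"
        else if pvMediumKws.any (fun kw => PySem.Str.isIn kw action_lower) then "medium"
        else priority
      acc ++ [(priority, action)]) []
  PySem.List.sorted prioritized pvKeyA false

-- ===== PORT B =====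
def prioritize_actions_alt (actions : List String) : List (String × String) :=
  let buckets : List (String × String) × List (String × String) :=
    actions.foldl (fun acc action =>
      let action_lower := PySem.Str.lower action
      if pvHighKws.any (fun kw => PySem.Str.isIn kw action_lower) then
        (acc.1 ++ [("high", action)], acc.2)
      else
        (acc.1, acc.2 ++ [("medium", action)])) ([], [])
  buckets.1 ++ buckets.2

-- ===== PRECONDITION & SPEC =====
def Spec_prioritize_actions (actions : List String) (out : List (String × String)) : Prop := out = prioritize_actions_alt actions
instance (actions : List String) (out : List (String × String)) : Decidable (Spec_prioritize_actions actions out) := by unfold Spec_prioritize_actions; infer_instance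

-- ===== CLAIM (what is proved, stated in full; the proofs are below) =====
def Claim_equal_prioritize_actions : Prop := ∀ (actions : List String), Dom_prioritize_actions actions → Spec_prioritize_actions actions (prioritize_actions actions)

-- ===== LEMMAS AND PROOFS =====

-- the classifier test both Pythons perform
def pvHi (action : String) : Bool :=
  pvHighKws.any (fun kw => PySem.Str.isIn kw (PySem.Str.lower action))

theorem pvKeyA_high (s : String) : pvKeyA ("high", s) = 0 := rfl
theorem pvKeyA_medium (s : String) : pvKeyA ("medium", s) = 1 := rfl

-- A's loop builds exactly the mapped list
theorem pvA_loop (l : List String) (init : List (String × String)) :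
    l.foldl (fun acc action =>
      let priority := "medium"
      let action_lower := PySem.Str.lower action
      let priority :=
        if pvHighKws.any (fun kw => PySem.Str.isIn kw action_lower) then "high"
        else if pvMediumKws.any (fun kw => PySem.Str.isIn kw action_lower) then "medium"
        else priority
      acc ++ [(priority, action)]) init
    = init ++ l.map (fun a => (if pvHi a then "high" else "medium", a)) := by
  induction l generalizing init with
  | nil => simp
  | cons a t ih =>
    simp only [List.foldl_cons, List.map_cons, ih, pvHi]
    by_cases h : pvHighKws.any (fun kw => PySem.Str.isIn kw (PySem.Str.lower a)) = true <;>
      simp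

-- B's loop builds the two filtered buckets
theorem pvB_loop (l : List String) (H M : List (String × String)) :
    l.foldl (fun acc action =>
      let action_lower := PySem.Str.lower action
      if pvHighKws.any (fun kw => PySem.Str.isIn kw action_lower) then
        (acc.1 ++ [("high", action)], acc.2)
      else
        (acc.1, acc.2 ++ [("medium", action)])) (H, M)
    = (H ++ (l.filter pvHi).map (fun a => ("high", a)),
       M ++ (l.filter (fun a => !pvHi a)).map (fun a => ("medium", a))) := by
  induction l generalizing H M with
  | nil => simp
  | cons a t ih =>
    simp only [List.foldl_cons]
    by_cases h : pvHighKws.any (fun kw => PySem.Str.isIn kw (PySem.Str.lower a)) = true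
    · rw [if_pos h, ih]
      have hp : pvHi a = true := h
      simp [hp]
    · rw [if_neg h, ih]
      have hp : pvHi a = false := by simpa [pvHi] using h
      simp [hp]

-- basic equations of PySem.List.insertBy
theorem pvInsertBy_nil {α : Type} (before : α → α → Bool) (x : α) :
    PySem.List.insertBy before x [] = [x] := rfl
theorem pvInsertBy_cons {α : Type} (before : α → α → Bool) (x y : α) (ys : List α) :
    PySem.List.insertBy before x (y :: ys) =
      if before x y then x :: y :: ys else y :: PySem.List.insertBy before x ys := rfl

-- inserting between a prefix it does not go before and a suffix it goes before
theorem pvInsertBy_middle {α : Type} (before : α → α → Bool) (x : α) (H M : List α)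
    (hH : ∀ y ∈ H, before x y = false)
    (hM : ∀ y ∈ M, before x y = true) :
    PySem.List.insertBy before x (H ++ M) = H ++ x :: M := by
  induction H with
  | nil =>
    cases M with
    | nil => simp [pvInsertBy_nil]
    | cons m ms => simp [pvInsertBy_cons, hM m (by simp)]
  | cons h t ih =>
    have hx := hH h (by simp)
    simp only [List.cons_append, pvInsertBy_cons, hx, Bool.false_eq_true, if_false]
    have := ih (fun y hy => hH y (by simp [hy]))
    simp [this]

-- inserting an element not before anything appends it
theorem pvInsertBy_last {α : Type} (before : α → α → Bool) (x : α) (l : List α)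
    (h : ∀ y ∈ l, before x y = false) :
    PySem.List.insertBy before x l = l ++ [x] := by
  induction l with
  | nil => simp [pvInsertBy_nil]
  | cons a t ih =>
    simp only [pvInsertBy_cons, h a (by simp), Bool.false_eq_true, if_false, List.cons_append]
    simp [ih (fun y hy => h y (by simp [hy]))]

-- the stable sort of the classified list is exactly the two buckets concatenated
theorem pvSorted_partition (l : List String) :
    PySem.List.sorted (l.map (fun a => (if pvHi a then "high" else "medium", a))) pvKeyA false
    = (l.filter pvHi).map (fun a => ("high", a))
      ++ (l.filter (fun a => !pvHi a)).map (fun a => ("medium", a)) := by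
  induction l using List.reverseRecOn with
  | nil => rfl
  | append_singleton t a ih =>
    rw [PySem.List.sorted_eq_foldl_insertBy] at *
    simp only [List.map_append, List.map_cons, List.map_nil, List.foldl_append, List.foldl_cons,
      List.foldl_nil, ih, List.filter_append, List.filter_cons, List.filter_nil]
    by_cases h : pvHi a = true
    · rw [pvInsertBy_middle]
      · simp [h]
      · intro y hy
        simp only [List.mem_map] at hy
        obtain ⟨b, _, rfl⟩ := hy
        simp [h, pvKeyA_high]
      · intro y hy
        simp only [List.mem_map] at hy
        obtain ⟨b, _, rfl⟩ := hy
        simp [h, pvKeyA_high, pvKeyA_medium]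
    · rw [pvInsertBy_last]
      · simp [h]
      · intro y hy
        simp only [List.mem_append, List.mem_map] at hy
        rcases hy with ⟨b, _, rfl⟩ | ⟨b, _, rfl⟩ <;>
          simp [h, pvKeyA_high, pvKeyA_medium]

-- ===== VERDICT (by name: the statement is the Claim_ definition above) =====
theorem prioritize_actions_spec : Claim_equal_prioritize_actions := by
  intro actions _
  unfold Spec_prioritize_actions prioritize_actions prioritize_actions_alt
  simp only [pvA_loop, List.nil_append, pvB_loop]
  exact pvSorted_partition actions
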